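-- pv_equiv track=rewrite | github.com/fenris-demo-dashboard/demo-dashboard | dashboard_supplements/aesthetics/aesthetics.py | camel_case_to_split_title
-- ===== SOURCE A (Python) =====
-- def camel_case_to_split_title(string: str) -> str:
--     """Split a camel case string to one with title case."""
--     if string.isupper():
--         return string
--     else:
--         start_idx = [i for i, e in enumerate(string) if e.isupper()] + [len(string)]
--
--         start_idx = [0] + start_idx
--         split_string = [string[x:y] for x, y in zip(start_idx, start_idx[1:])]
--         return " ".join(x.title() for x in split_string)
-- ===== SOURCE B (Python) =====
-- def camel_case_to_split_title(string: str) -> str: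
--     """Split a camel case string to one with title case."""
--     if string.isupper():
--         return string
--     return "".join(" " + c if c.isupper() else c for c in string).title()
-- ===== Notes on version B (the rewrite author's own statement) =====
-- stated objective: idiomatic
-- what changed: Replaces the uppercase-index table, pairwise zip-slicing and per-slice .title() with a single character pass that prefixes a space before each uppercase character and titles the whole result once.
import Mathlib
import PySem

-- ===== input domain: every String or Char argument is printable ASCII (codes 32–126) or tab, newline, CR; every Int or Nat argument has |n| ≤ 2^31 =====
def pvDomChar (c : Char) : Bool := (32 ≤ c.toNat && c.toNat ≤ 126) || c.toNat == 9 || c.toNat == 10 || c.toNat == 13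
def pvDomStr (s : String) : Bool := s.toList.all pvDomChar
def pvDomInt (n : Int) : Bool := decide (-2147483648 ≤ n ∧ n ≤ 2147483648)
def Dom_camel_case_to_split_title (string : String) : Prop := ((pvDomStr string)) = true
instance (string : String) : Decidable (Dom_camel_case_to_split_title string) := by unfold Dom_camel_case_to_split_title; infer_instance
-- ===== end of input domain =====

-- B replaces A's uppercase-index table + zip-slicing + per-slice title by one char pass
-- that inserts a space before each uppercase char, then titles once (idiomatic; same cost).

-- shared built-in helpers (both Pythons call str.title / str.isupper; exact on ASCII,
-- where Python's "cased" characters are exactly the alphabetic ones)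

-- str.title(): alpha char is uppercased after a non-alpha (or at the start), lowercased after an alpha
def pyTitleAux : Bool → List Char → List Char
  | _, [] => []
  | prevAlpha, c :: cs =>
    (if PySem.Chars.isalpha c then
        (if prevAlpha then PySem.Chars.lowerChar c else PySem.Chars.upperChar c)
      else c) :: pyTitleAux (PySem.Chars.isalpha c) cs

def pyTitle (cs : List Char) : List Char := pyTitleAux false cs

-- str.isupper(): at least one cased char and no lowercase char (exact on ASCII)
def pyIsupperStr (cs : List Char) : Bool :=
  cs.any PySem.Chars.isalpha && cs.all (fun c => !PySem.Chars.islower c)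

-- ===== PORT A =====
def camel_case_to_split_title (string : String) : String :=
  if pyIsupperStr string.toList then string
  else
    let cs := string.toList
    let start_idx : List Int :=
      ((PySem.List.enumerate cs 0).filter (fun p => PySem.Chars.isupper p.2)).map (·.1)
        ++ [(cs.length : Int)]
    let start_idx2 : List Int := 0 :: start_idx
    let split_string : List (List Char) :=
      (start_idx2.zip start_idx2.tail).map (fun p => PySem.List.slice cs (some p.1) (some p.2))
    String.ofList (PySem.Chars.join [' '] (split_string.map pyTitle))

-- ===== PORT B =====
def camel_case_to_split_title_alt (string : String) : String :=
  if pyIsupperStr string.toList then string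
  else
    String.ofList (pyTitle (string.toList.flatMap
      (fun c => if PySem.Chars.isupper c then [' ', c] else [c])))

-- ===== PRECONDITION & SPEC =====
def Spec_camel_case_to_split_title (string : String) (out : String) : Prop := out = camel_case_to_split_title_alt string
instance (string : String) (out : String) : Decidable (Spec_camel_case_to_split_title string out) := by unfold Spec_camel_case_to_split_title; infer_instance

-- ===== CLAIM (what is proved, stated in full; the proofs are below) =====
def Claim_equal_camel_case_to_split_title : Prop := ∀ (string : String), Dom_camel_case_to_split_title string → Spec_camel_case_to_split_title string (camel_case_to_split_title string)

-- ===== LEMMAS AND PROOFS =====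

-- Nat-level uppercase positions, shifted by a start offset
def upN : List Char → Nat → List Nat
  | [], _ => []
  | c :: cs, s => (if PySem.Chars.isupper c then [s] else []) ++ upN cs (s + 1)

-- greedy word split at uppercase positions: head word and tail words
def wordsH : List Char → List Char
  | [] => []
  | c :: cs => if PySem.Chars.isupper c then [] else c :: wordsH cs

def wordsT : List Char → List (List Char)
  | [] => []
  | c :: cs => if PySem.Chars.isupper c then (c :: wordsH cs) :: wordsT cs else wordsT cs

-- the character expansion B performs
def expandUp (cs : List Char) : List Char :=
  cs.flatMap (fun c => if PySem.Chars.isupper c then [' ', c] else [c])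

-- Nat cut list and the slices A takes between consecutive cuts
def cutsN (cs : List Char) : List Nat := 0 :: (upN cs 0 ++ [cs.length])

def segs (cs : List Char) : List (List Char) :=
  ((cutsN cs).zip (cutsN cs).tail).map (fun p => (cs.drop p.1).take (p.2 - p.1))

theorem enumerate_filter_upper (cs : List Char) (s : Nat) :
    (((PySem.List.enumerate cs (s : Int)).filter (fun p => PySem.Chars.isupper p.2)).map (·.1))
      = (upN cs s).map (fun n : Nat => (n : Int)) := by
  induction cs generalizing s with
  | nil => simp [PySem.List.enumerate_nil, upN]
  | cons c cs ih =>
    have hs : ((s : Int) + 1) = ((s + 1 : Nat) : Int) := by push_cast; ring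
    rw [PySem.List.enumerate_cons, hs]
    cases h : PySem.Chars.isupper c with
    | true =>
      rw [List.filter_cons_of_pos (by simpa using h), List.map_cons, ih (s + 1)]
      simp [upN, h]
    | false =>
      rw [List.filter_cons_of_neg (by simpa using h), ih (s + 1)]
      simp [upN, h]

theorem upN_shift (cs : List Char) (s : Nat) :
    upN cs (s + 1) = (upN cs s).map (fun n => n + 1) := by
  induction cs generalizing s with
  | nil => simp [upN]
  | cons c cs ih =>
    cases h : PySem.Chars.isupper c <;> simp [upN, h, ih (s + 1)]

theorem cuts_ne_nil (cs : List Char) : ∃ k1 kt, upN cs 0 ++ [cs.length] = k1 :: kt := by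
  cases h : upN cs 0 with
  | nil => exact ⟨cs.length, [], by simp [h]⟩
  | cons a t => exact ⟨a, t ++ [cs.length], by simp [h]⟩

theorem segs_shift (c : Char) (cs : List Char) (a : Nat) (ks : List Nat) :
    ((((a :: ks).map (fun n => n + 1)).zip (ks.map (fun n => n + 1))).map
        (fun p => ((c :: cs).drop p.1).take (p.2 - p.1)))
      = (((a :: ks).zip ks).map (fun p => (cs.drop p.1).take (p.2 - p.1))) := by
  rw [List.zip_map, List.map_map]
  apply List.map_congr_left
  intro p _
  simp only [Function.comp, Prod.map]
  rw [List.drop_succ_cons]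
  congr 1
  omega

theorem segs_eq_words (cs : List Char) : segs cs = wordsH cs :: wordsT cs := by
  induction cs with
  | nil => simp [segs, cutsN, upN, wordsH, wordsT]
  | cons c cs ih =>
    obtain ⟨k1, kt, hk⟩ := cuts_ne_nil cs
    have h1 : upN cs 1 ++ [(c :: cs).length] = (k1 + 1) :: kt.map (fun n => n + 1) := by
      rw [List.length_cons,
        show upN cs 1 = (upN cs 0).map (fun n => n + 1) from by simpa using upN_shift cs 0,
        show ([cs.length + 1] : List Nat) = [cs.length].map (fun n => n + 1) from rfl,
        ← List.map_append, hk]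
      rfl
    have hseg : segs cs = (cs.take k1) :: ((k1 :: kt).zip kt).map
        (fun p => (cs.drop p.1).take (p.2 - p.1)) := by
      simp [segs, cutsN, hk]
    have htail : ((((k1 + 1) :: kt.map (fun n => n + 1)).zip (kt.map (fun n => n + 1))).map
        (fun p => ((c :: cs).drop p.1).take (p.2 - p.1)))
        = ((k1 :: kt).zip kt).map (fun p => (cs.drop p.1).take (p.2 - p.1)) := by
      have h := segs_shift c cs k1 kt
      simpa using h
    rw [hseg] at ih
    have hIHhead : cs.take k1 = wordsH cs := (List.cons_eq_cons.mp ih).1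
    have hIHtail : ((k1 :: kt).zip kt).map (fun p => (cs.drop p.1).take (p.2 - p.1)) = wordsT cs :=
      (List.cons_eq_cons.mp ih).2
    cases h : PySem.Chars.isupper c with
    | true =>
      have hcc : cutsN (c :: cs) = 0 :: 0 :: (k1 + 1) :: kt.map (fun n => n + 1) := by
        show 0 :: (upN (c :: cs) 0 ++ [(c :: cs).length]) = _
        rw [show upN (c :: cs) 0 = 0 :: upN cs 1 from by simp [upN, h], List.cons_append, h1]
      rw [segs, hcc]
      simp only [List.tail_cons, List.zip_cons_cons, List.map_cons]
      rw [htail, hIHtail]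
      simp [wordsH, wordsT, h, List.take_succ_cons, hIHhead]
    | false =>
      have hcc : cutsN (c :: cs) = 0 :: (k1 + 1) :: kt.map (fun n => n + 1) := by
        show 0 :: (upN (c :: cs) 0 ++ [(c :: cs).length]) = _
        rw [show upN (c :: cs) 0 = upN cs 1 from by simp [upN, h], h1]
      rw [segs, hcc]
      simp only [List.tail_cons, List.zip_cons_cons, List.map_cons]
      rw [htail, hIHtail]
      simp [wordsH, wordsT, h, List.take_succ_cons, hIHhead]

theorem titleAux_append_space (a b : List Char) (p : Bool) :
    pyTitleAux p (a ++ ' ' :: b) = pyTitleAux p a ++ ' ' :: pyTitleAux false b := by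
  induction a generalizing p with
  | nil =>
    have hsp : PySem.Chars.isalpha ' ' = false := by decide
    simp [pyTitleAux, hsp]
  | cons x xs ih => simp [pyTitleAux, ih]

theorem join_two (w : List Char) (w2 : List Char) (ws : List (List Char)) :
    PySem.Chars.join [' '] (w :: w2 :: ws) = w ++ ' ' :: PySem.Chars.join [' '] (w2 :: ws) := by
  rw [PySem.Chars.join_cons_cons]; simp

theorem title_join (w : List Char) (ws : List (List Char)) :
    pyTitle (PySem.Chars.join [' '] (w :: ws)) = PySem.Chars.join [' '] ((w :: ws).map pyTitle) := by
  induction ws generalizing w with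
  | nil => simp [PySem.Chars.join_singleton]
  | cons w2 ws ih =>
    have hR : PySem.Chars.join [' '] ((w :: w2 :: ws).map pyTitle)
        = pyTitle w ++ ' ' :: PySem.Chars.join [' '] ((w2 :: ws).map pyTitle) := by
      simp only [List.map_cons]
      exact join_two _ _ _
    rw [join_two, hR, pyTitle, titleAux_append_space]
    rw [show pyTitleAux false (PySem.Chars.join [' '] (w2 :: ws))
        = pyTitle (PySem.Chars.join [' '] (w2 :: ws)) from rfl, ih]
    rfl

theorem join_cons_head (s : List Char) (c : Char) (w : List Char) (ws : List (List Char)) :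
    PySem.Chars.join s ((c :: w) :: ws) = c :: PySem.Chars.join s (w :: ws) := by
  cases ws with
  | nil => simp [PySem.Chars.join_singleton]
  | cons w2 ws => rw [PySem.Chars.join_cons_cons, PySem.Chars.join_cons_cons]; simp

theorem join_words_eq_expand (cs : List Char) :
    PySem.Chars.join [' '] (wordsH cs :: wordsT cs) = expandUp cs := by
  induction cs with
  | nil => simp [wordsH, wordsT, expandUp, PySem.Chars.join_singleton]
  | cons c cs ih =>
    cases h : PySem.Chars.isupper c with
    | true =>
      simp only [wordsH, wordsT, h, if_pos, expandUp, List.flatMap_cons]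
      rw [join_two, join_cons_head, ih]
      simp [expandUp]
    | false =>
      simp only [wordsH, wordsT, h, if_neg, Bool.false_eq_true, not_false_iff, expandUp,
        List.flatMap_cons]
      rw [join_cons_head, ih]
      simp [expandUp]

theorem slice_zip_cast (cs : List Char) (l : List Nat) :
    (((l.map (fun n : Nat => (n : Int))).zip ((l.map (fun n : Nat => (n : Int))).tail)).map
        (fun p => PySem.List.slice cs (some p.1) (some p.2)))
      = (l.zip l.tail).map (fun p => (cs.drop p.1).take (p.2 - p.1)) := by
  induction l with
  | nil => simp
  | cons x l ih =>
    cases l with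
    | nil => simp
    | cons y rest =>
      simp only [List.map_cons, List.tail_cons, List.zip_cons_cons] at *
      rw [PySem.List.slice_natCast, ih]

theorem portA_segs (cs : List Char) :
    (let start_idx2 : List Int := 0 :: (((PySem.List.enumerate cs 0).filter
        (fun p => PySem.Chars.isupper p.2)).map (·.1) ++ [(cs.length : Int)]);
      (start_idx2.zip start_idx2.tail).map (fun p => PySem.List.slice cs (some p.1) (some p.2)))
      = segs cs := by
  have e0 := enumerate_filter_upper cs 0
  rw [Nat.cast_zero] at e0
  have hcast : ((0 : Int) :: (((PySem.List.enumerate cs 0).filter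
      (fun p => PySem.Chars.isupper p.2)).map (·.1) ++ [(cs.length : Int)]))
      = (cutsN cs).map (fun n : Nat => (n : Int)) := by
    rw [e0, cutsN]
    simp
  simp only []
  rw [hcast, slice_zip_cast]
  rfl

-- ===== VERDICT (by name: the statement is the Claim_ definition above) =====
theorem camel_case_to_split_title_spec : Claim_equal_camel_case_to_split_title := by
  intro s _
  unfold Spec_camel_case_to_split_title camel_case_to_split_title camel_case_to_split_title_alt
  cases h : pyIsupperStr s.toList with
  | true => simp
  | false =>
    simp only [Bool.false_eq_true, if_neg, not_false_iff]
    have hsegs := portA_segs s.toList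
    simp only [] at hsegs
    rw [hsegs, segs_eq_words, ← title_join, join_words_eq_expand]
    rfl
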